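-- pv_equiv track=rewrite | github.com/mayflower/legacy-use | server/computer_use/handlers/converter_utils.py | normalize_key_part
-- ===== SOURCE A (Python) =====
-- KEY_ALIASES = {
--     'Escape': {'esc', 'escape'},
--     'Return': {'enter', 'return'},
--     'Super_L': {'win', 'windows', 'super', 'meta', 'cmd', 'super_l', 'super_r'},
--     'BackSpace': {'backspace'},
--     'Delete': {'del', 'delete'},
--     'Tab': {'tab'},
--     'space': {'space'},
--     'Page_Up': {'pageup'},
--     'Page_Down': {'pagedown'},
--     'Home': {'home'},
--     'End': {'end'},
--     'Up': {'up'},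
--     'Down': {'down'},
--     'Left': {'left'},
--     'Right': {'right'},
--     'Print': {'printscreen', 'prtsc'},
--     'ctrl': {'ctrl', 'control', 'ctrl_l', 'ctrl_r'},
--     'shift': {'shift', 'shift_l', 'shift_r'},
--     'alt': {'alt', 'alt_l', 'alt_r', 'option'},
-- }
--
-- def normalize_key_part(part: str) -> str:
--     """
--     Normalize a single key part.
--
--     Args:
--         part: Single key part to normalize
--
--     Returns:
--         Normalized key string
--     """
--     low = part.lower()
--
--     # Check key aliases - find canonical form for any alias
--     for canonical, aliases in KEY_ALIASES.items():
--         if low in aliases: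
--             return canonical
--
--     # Function keys
--     if low.startswith('f') and low[1:].isdigit():
--         return f'F{int(low[1:])}'
--
--     # Single letters or digits: keep as-is
--     if len(part) == 1:
--         return part
--
--     return part
-- ===== SOURCE B (Python) =====
-- # B: precomputed reverse index alias -> canonical; single dict lookup instead of scanning KEY_ALIASES.
-- ALIAS_TO_CANONICAL = {
--     'esc': 'Escape', 'escape': 'Escape',
--     'enter': 'Return', 'return': 'Return',
--     'win': 'Super_L', 'windows': 'Super_L', 'super': 'Super_L', 'meta': 'Super_L',
--     'cmd': 'Super_L', 'super_l': 'Super_L', 'super_r': 'Super_L',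
--     'backspace': 'BackSpace',
--     'del': 'Delete', 'delete': 'Delete',
--     'tab': 'Tab',
--     'space': 'space',
--     'pageup': 'Page_Up',
--     'pagedown': 'Page_Down',
--     'home': 'Home',
--     'end': 'End',
--     'up': 'Up',
--     'down': 'Down',
--     'left': 'Left',
--     'right': 'Right',
--     'printscreen': 'Print', 'prtsc': 'Print',
--     'ctrl': 'ctrl', 'control': 'ctrl', 'ctrl_l': 'ctrl', 'ctrl_r': 'ctrl',
--     'shift': 'shift', 'shift_l': 'shift', 'shift_r': 'shift',
--     'alt': 'alt', 'alt_l': 'alt', 'alt_r': 'alt', 'option': 'alt',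
-- }
--
-- def normalize_key_part(part: str) -> str:
--     low = part.lower()
--     hit = ALIAS_TO_CANONICAL.get(low)
--     if hit is not None:
--         return hit
--     if low.startswith('f') and low[1:].isdigit():
--         return f'F{int(low[1:])}'
--     return part
-- ===== Notes on version B (the rewrite author's own statement) =====
-- stated objective: idiomatic
-- what changed: Replaces the per-call linear scan over KEY_ALIASES with its set-membership tests by a single get on a precomputed module-level alias-to-canonical dict, and folds the redundant len==1 branch into the final fallthrough.
import Mathlib
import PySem

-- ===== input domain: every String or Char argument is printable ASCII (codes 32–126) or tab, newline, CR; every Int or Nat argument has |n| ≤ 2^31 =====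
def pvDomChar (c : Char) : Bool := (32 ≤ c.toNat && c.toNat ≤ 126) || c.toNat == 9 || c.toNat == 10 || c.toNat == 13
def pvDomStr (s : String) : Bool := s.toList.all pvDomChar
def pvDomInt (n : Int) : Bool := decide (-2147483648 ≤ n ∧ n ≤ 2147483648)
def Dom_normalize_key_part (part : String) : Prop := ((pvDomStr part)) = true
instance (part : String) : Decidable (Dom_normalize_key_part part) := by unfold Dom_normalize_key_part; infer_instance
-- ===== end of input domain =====

-- B replaces A's per-call scan over the alias table (set membership per row) by one lookup in a
-- precomputed alias→canonical dict; same return value everywhere (idiomatic, not claimed faster).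

-- ===== PORT A =====
def pvKeyAliases : List (String × PySem.Set String) :=
  [("Escape", PySem.Set.ofList ["esc", "escape"]),
   ("Return", PySem.Set.ofList ["enter", "return"]),
   ("Super_L", PySem.Set.ofList ["win", "windows", "super", "meta", "cmd", "super_l", "super_r"]),
   ("BackSpace", PySem.Set.ofList ["backspace"]),
   ("Delete", PySem.Set.ofList ["del", "delete"]),
   ("Tab", PySem.Set.ofList ["tab"]),
   ("space", PySem.Set.ofList ["space"]),
   ("Page_Up", PySem.Set.ofList ["pageup"]),
   ("Page_Down", PySem.Set.ofList ["pagedown"]),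
   ("Home", PySem.Set.ofList ["home"]),
   ("End", PySem.Set.ofList ["end"]),
   ("Up", PySem.Set.ofList ["up"]),
   ("Down", PySem.Set.ofList ["down"]),
   ("Left", PySem.Set.ofList ["left"]),
   ("Right", PySem.Set.ofList ["right"]),
   ("Print", PySem.Set.ofList ["printscreen", "prtsc"]),
   ("ctrl", PySem.Set.ofList ["ctrl", "control", "ctrl_l", "ctrl_r"]),
   ("shift", PySem.Set.ofList ["shift", "shift_l", "shift_r"]),
   ("alt", PySem.Set.ofList ["alt", "alt_l", "alt_r", "option"])]

-- the 'for canonical, aliases in KEY_ALIASES.items(): if low in aliases: return canonical' loop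
def pvAliasScan (low : String) : List (String × PySem.Set String) → Option String
  | [] => none
  | (canonical, aliases) :: rest =>
      if PySem.Set.contains aliases low then some canonical else pvAliasScan low rest

def normalize_key_part (part : String) : String :=
  let low := PySem.Str.lower part
  match pvAliasScan low pvKeyAliases with
  | some canonical => canonical
  | none =>
    if PySem.Str.startswith low "f" && PySem.Str.strIsdigit (PySem.Str.slice low (some 1) none) then
      -- int(low[1:]) cannot raise here (guarded by isdigit), so getD 0 is exact
      "F" ++ PySem.Int.toStr ((PySem.Int.ofStr? (PySem.Str.slice low (some 1) none)).getD 0)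
    else if PySem.Str.len part = 1 then part
    else part

-- ===== PORT B =====
def pvAliasToCanonical : PySem.Dict String String :=
  PySem.Dict.ofList
    [("esc", "Escape"), ("escape", "Escape"),
     ("enter", "Return"), ("return", "Return"),
     ("win", "Super_L"), ("windows", "Super_L"), ("super", "Super_L"), ("meta", "Super_L"),
     ("cmd", "Super_L"), ("super_l", "Super_L"), ("super_r", "Super_L"),
     ("backspace", "BackSpace"),
     ("del", "Delete"), ("delete", "Delete"),
     ("tab", "Tab"),
     ("space", "space"),
     ("pageup", "Page_Up"),
     ("pagedown", "Page_Down"),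
     ("home", "Home"),
     ("end", "End"),
     ("up", "Up"),
     ("down", "Down"),
     ("left", "Left"),
     ("right", "Right"),
     ("printscreen", "Print"), ("prtsc", "Print"),
     ("ctrl", "ctrl"), ("control", "ctrl"), ("ctrl_l", "ctrl"), ("ctrl_r", "ctrl"),
     ("shift", "shift"), ("shift_l", "shift"), ("shift_r", "shift"),
     ("alt", "alt"), ("alt_l", "alt"), ("alt_r", "alt"), ("option", "alt")]

def normalize_key_part_alt (part : String) : String :=
  let low := PySem.Str.lower part
  match PySem.Dict.get? pvAliasToCanonical low with
  | some hit => hit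
  | none =>
    if PySem.Str.startswith low "f" && PySem.Str.strIsdigit (PySem.Str.slice low (some 1) none) then
      "F" ++ PySem.Int.toStr ((PySem.Int.ofStr? (PySem.Str.slice low (some 1) none)).getD 0)
    else part

-- ===== PRECONDITION & SPEC =====
def Spec_normalize_key_part (part : String) (out : String) : Prop := out = normalize_key_part_alt part
instance (part : String) (out : String) : Decidable (Spec_normalize_key_part part out) := by unfold Spec_normalize_key_part; infer_instance

-- ===== CLAIM (what is proved, stated in full; the proofs are below) =====
def Claim_equal_normalize_key_part : Prop := ∀ (part : String), Dom_normalize_key_part part → Spec_normalize_key_part part (normalize_key_part part)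

-- ===== LEMMAS AND PROOFS =====

-- flattening one row of the table: lookup in the row's (alias, canonical) pairs is the row's membership test
theorem pv_get_row (low c : String) (as : List String) (rest : List (String × String)) :
    (PySem.Dict.mk (as.map (fun a => (a, c)) ++ rest)).get? low
      = if as.contains low then some c else (PySem.Dict.mk rest).get? low := by
  induction as with
  | nil => simp
  | cons a t ih =>
      by_cases h : a == low
      · have hla : low = a := (beq_iff_eq.mp h).symm
        simp [PySem.Dict.get?_mk_cons, hla]
      · have hne : ¬ low = a := fun e => h (by simp [e])
        simp [PySem.Dict.get?_mk_cons, h, ih, hne]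

-- A's scan over any alias table equals first-match lookup in the flattened pair list
theorem pv_scan_eq_get (low : String) (t : List (String × PySem.Set String)) :
    pvAliasScan low t
      = (PySem.Dict.mk (t.flatMap (fun p => p.2.map (fun a => (a, p.1))))).get? low := by
  induction t with
  | nil => simp [pvAliasScan]; rfl
  | cons p rest ih =>
      obtain ⟨c, as⟩ := p
      simp only [pvAliasScan, List.flatMap_cons, pv_get_row, ih]
      rfl

-- B's precomputed dict is exactly the flattening of A's table (all aliases distinct, so ofList = mk)
set_option maxRecDepth 4096 in
theorem pv_table_flatten :
    pvAliasToCanonical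
      = PySem.Dict.mk (pvKeyAliases.flatMap (fun p => p.2.map (fun a => (a, p.1)))) := by
  decide

-- ===== VERDICT (by name: the statement is the Claim_ definition above) =====
theorem normalize_key_part_spec : Claim_equal_normalize_key_part := by
  intro part _
  unfold Spec_normalize_key_part normalize_key_part normalize_key_part_alt
  simp only [pv_scan_eq_get, ← pv_table_flatten]
  cases PySem.Dict.get? pvAliasToCanonical (PySem.Str.lower part) with
  | some c => rfl
  | none => simp
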